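-- pv_equiv track=rewrite | github.com/olls/advent-of-code | day5.py | nice_name_a
-- ===== SOURCE A (Python) =====
-- def nice_name_a(name):
--     if not (sum(name.count(t) for t in 'aeiou') >= 3):
--         return False
--
--     double = False
--     for p in range(len(name)-1):
--         if name[p] == name[p+1]:
--             double = True
--             break
--     if not double:
--         return False
--
--     return not any((t in name) for t in ('ab', 'cd', 'pq', 'xy'))
-- ===== SOURCE B (Python) =====
-- def nice_name_a(name):
--     vowels = 0
--     double = False
--     bad = False
--     prev = None
--     for c in name:
--         if c in 'aeiou':
--             vowels += 1
--         if prev is not None: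
--             if prev == c:
--                 double = True
--             if prev + c in ('ab', 'cd', 'pq', 'xy'):
--                 bad = True
--         prev = c
--     return vowels >= 3 and double and not bad
-- ===== Notes on version B (the rewrite author's own statement) =====
-- stated objective: alternative
-- what changed: Replaces A's three separate scans (five substring-count passes, an index loop with break, and four substring searches) by one single-pass loop that tracks a vowel count, a double flag and a forbidden-pair flag while remembering the previous character.
import Mathlib
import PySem

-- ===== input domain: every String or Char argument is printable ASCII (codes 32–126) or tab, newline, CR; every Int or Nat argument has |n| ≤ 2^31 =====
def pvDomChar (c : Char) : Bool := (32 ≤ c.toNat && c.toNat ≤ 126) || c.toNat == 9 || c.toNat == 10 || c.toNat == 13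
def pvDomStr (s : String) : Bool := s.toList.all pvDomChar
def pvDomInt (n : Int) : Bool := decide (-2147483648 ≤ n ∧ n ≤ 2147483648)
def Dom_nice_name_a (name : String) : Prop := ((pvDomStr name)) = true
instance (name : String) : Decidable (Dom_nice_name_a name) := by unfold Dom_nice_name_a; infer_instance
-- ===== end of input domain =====

-- B fuses A's separate scans (vowel counts, adjacent-double loop, forbidden-substring checks)
-- into one single pass that remembers the previous character; same Boolean result.


-- ===== PORT A =====
def nice_name_a (name : String) : Bool :=
  let cs := name.toList
  -- if not (sum(name.count(t) for t in 'aeiou') >= 3): return False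
  if !decide (3 ≤ (("aeiou".toList).map (fun t => (PySem.Chars.count cs [t] : Int))).sum) then
    false
  else
    -- for p in range(len(name)-1): if name[p] == name[p+1]: double = True; break
    -- (the break-on-first-hit loop setting a flag is `.any`; name[p]/name[p+1] are
    --  always in range for p in range(len-1), so pyGetD with a default is exact)
    let double := (PySem.List.pyRange 0 (PySem.List.len cs - 1) 1).any
        (fun p => PySem.List.pyGetD cs p ' ' == PySem.List.pyGetD cs (p + 1) ' ')
    if !double then
      false
    else
      -- return not any((t in name) for t in ('ab', 'cd', 'pq', 'xy'))
      !((["ab", "cd", "pq", "xy"] : List String).any (fun t => PySem.Str.isIn t name))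

-- ===== PORT B =====
-- state: (vowel count, double flag, bad flag, previous character)
def pvStepB (st : Int × Bool × Bool × Option Char) (c : Char) : Int × Bool × Bool × Option Char :=
  ((if c ∈ ['a', 'e', 'i', 'o', 'u'] then st.1 + 1 else st.1),
   (st.2.1 || (match st.2.2.2 with | some p => decide (p = c) | none => false)),
   (st.2.2.1 || (match st.2.2.2 with
     | some p => decide ([p, c] ∈ [['a','b'], ['c','d'], ['p','q'], ['x','y']])
     | none => false)),
   some c)

def nice_name_a_alt (name : String) : Bool :=
  let st := name.toList.foldl pvStepB (0, false, false, none)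
  decide (3 ≤ st.1) && st.2.1 && !st.2.2.1

-- ===== PRECONDITION & SPEC =====
def Spec_nice_name_a (name : String) (out : Bool) : Prop := out = nice_name_a_alt name
instance (name : String) (out : Bool) : Decidable (Spec_nice_name_a name out) := by unfold Spec_nice_name_a; infer_instance

-- ===== CLAIM (what is proved, stated in full; the proofs are below) =====
def Claim_equal_nice_name_a : Prop := ∀ (name : String), Dom_nice_name_a name → Spec_nice_name_a name (nice_name_a name)

-- ===== LEMMAS AND PROOFS =====

-- canonical forms of the three conditions, on List Char
def pvIsVowel (c : Char) : Bool := c ∈ ['a', 'e', 'i', 'o', 'u']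

def pvHasDbl : List Char → Bool
  | a :: b :: t => (a == b) || pvHasDbl (b :: t)
  | _ => false

def pvHasBad : List Char → Bool
  | a :: b :: t => decide ([a, b] ∈ [['a','b'], ['c','d'], ['p','q'], ['x','y']]) || pvHasBad (b :: t)
  | _ => false

def pvHasSub2 (x y : Char) : List Char → Bool
  | a :: b :: t => (decide (a = x) && decide (b = y)) || pvHasSub2 x y (b :: t)
  | _ => false

-- PySem.Chars.count for a single-character needle is List.count
theorem pv_go_single (c : Char) (l : List Char) : ∀ (fuel acc : Nat), l.length ≤ fuel →
    PySem.Chars.count.go [c] fuel l acc = acc + l.count c := by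
  induction l with
  | nil => intro fuel acc h; cases fuel <;> simp [PySem.Chars.count.go]
  | cons x t ih =>
    intro fuel acc h
    cases fuel with
    | zero => simp at h
    | succ f =>
      by_cases hx : x = c
      · subst hx
        simp only [PySem.Chars.count.go]
        simp [List.isPrefixOf, ih f (acc + 1) (by simpa using h)]
        omega
      · simp only [PySem.Chars.count.go]
        simp [List.isPrefixOf, hx, Ne.symm hx, ih f acc (by simpa using h)]

theorem pv_count_single (s : List Char) (c : Char) :
    PySem.Chars.count s [c] = s.count c := by
  simp [PySem.Chars.count]
  simpa using pv_go_single c s s.length 0 le_rfl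

-- A's vowel sum is the single-pass vowel countP
theorem pv_vowel_sum (cs : List Char) :
    (("aeiou".toList).map (fun t => (PySem.Chars.count cs [t] : Int))).sum
      = (cs.countP pvIsVowel : Int) := by
  have h : "aeiou".toList = ['a', 'e', 'i', 'o', 'u'] := by decide
  simp only [h, List.map, List.sum_cons, List.sum_nil, pv_count_single]
  induction cs with
  | nil => simp
  | cons x t ih =>
    simp only [List.count_cons, List.countP_cons, pvIsVowel]
    by_cases ha : x = 'a' <;> by_cases he : x = 'e' <;> by_cases hi : x = 'i' <;>
      by_cases ho : x = 'o' <;> by_cases hu : x = 'u' <;>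
      simp_all <;> omega

-- A's index loop is the fused double flag
theorem pv_range_dbl (a : Char) (t : List Char) :
    (List.range ((a :: t).length - 1)).any
      (fun p => (a :: t).getD p ' ' == (a :: t).getD (p + 1) ' ') = pvHasDbl (a :: t) := by
  induction t generalizing a with
  | nil => simp [pvHasDbl]
  | cons b t ih =>
    have : (a :: b :: t).length - 1 = ((b :: t).length - 1) + 1 := by simp
    rw [this, List.range_succ_eq_map, List.any_cons, List.any_map]
    have hcg : ((List.range ((b :: t).length - 1)).any
        ((fun p => (a :: b :: t).getD p ' ' == (a :: b :: t).getD (p + 1) ' ') ∘ Nat.succ))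
        = (List.range ((b :: t).length - 1)).any
            (fun p => (b :: t).getD p ' ' == (b :: t).getD (p + 1) ' ') :=
      congrArg _ (funext fun p => rfl)
    rw [hcg, ih b]
    rfl

-- two-character substring containment is adjacent-pair search
theorem pv_infix2 (x y : Char) (cs : List Char) :
    ([x, y] <:+: cs) ↔ pvHasSub2 x y cs = true := by
  induction cs with
  | nil => simp [pvHasSub2]
  | cons a t ih =>
    rw [List.infix_cons_iff]
    cases t with
    | nil =>
      simp [pvHasSub2, List.prefix_cons_iff]
    | cons b t' =>
      show _ ↔ (pvHasSub2 x y (a :: b :: t') = true)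
      simp only [pvHasSub2, Bool.or_eq_true, Bool.and_eq_true, decide_eq_true_eq, ← ih]
      constructor
      · rintro (hp | hin)
        · left
          rcases List.cons_prefix_cons.mp hp with ⟨rfl, hp2⟩
          rcases List.cons_prefix_cons.mp hp2 with ⟨rfl, -⟩
          exact ⟨rfl, rfl⟩
        · right; exact hin
      · rintro (⟨rfl, rfl⟩ | hin)
        · left; simp
        · right; exact hin

-- the fused bad flag is the disjunction of the four pair searches
theorem pv_hasBad_eq (cs : List Char) :
    pvHasBad cs = (pvHasSub2 'a' 'b' cs || pvHasSub2 'c' 'd' cs ||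
                   pvHasSub2 'p' 'q' cs || pvHasSub2 'x' 'y' cs) := by
  induction cs with
  | nil => rfl
  | cons a t ih =>
    cases t with
    | nil => rfl
    | cons b t' =>
      show (decide _ || pvHasBad (b :: t')) = _
      rw [ih]
      show _ = ((_ || pvHasSub2 'a' 'b' (b :: t')) || (_ || pvHasSub2 'c' 'd' (b :: t')) ||
                (_ || pvHasSub2 'p' 'q' (b :: t')) || (_ || pvHasSub2 'x' 'y' (b :: t')))
      rw [Bool.eq_iff_iff]
      simp only [Bool.or_eq_true, Bool.and_eq_true, decide_eq_true_eq, List.mem_cons,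
        List.cons.injEq, and_true, List.not_mem_nil, or_false]
      tauto

-- invariant of B's single-pass fold, once a previous character exists
theorem pv_fold_inv (cs : List Char) : ∀ (p : Char) (v : Int) (d b : Bool),
    cs.foldl pvStepB (v, d, b, some p)
      = (v + cs.countP pvIsVowel, d || pvHasDbl (p :: cs), b || pvHasBad (p :: cs),
         some ((p :: cs).getLast (by simp))) := by
  induction cs with
  | nil => intro p v d b; simp [pvHasDbl, pvHasBad]
  | cons c t ih =>
    intro p v d b
    rw [List.foldl_cons]
    show t.foldl pvStepB
        ((if c ∈ ['a','e','i','o','u'] then v + 1 else v), (d || decide (p = c)),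
         (b || decide ([p, c] ∈ [['a','b'], ['c','d'], ['p','q'], ['x','y']])), some c) = _
    rw [ih]
    refine Prod.ext ?_ (Prod.ext ?_ (Prod.ext ?_ ?_))
    · simp only [List.countP_cons, pvIsVowel]
      by_cases h : (c ∈ ['a','e','i','o','u'])
      · simp [h]; ring
      · simp [h]
    · show _ = (d || pvHasDbl (p :: c :: t))
      show (d || decide (p = c) || pvHasDbl (c :: t)) = (d || ((p == c) || pvHasDbl (c :: t)))
      have hb : (p == c) = decide (p = c) := by rw [Bool.eq_iff_iff]; simp
      rw [hb, Bool.or_assoc]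
    · show _ = (b || pvHasBad (p :: c :: t))
      show _ = (b || (decide _ || pvHasBad (c :: t)))
      cases b <;> simp [Bool.or_assoc]
    · show some ((c :: t).getLast (by simp)) = some ((p :: c :: t).getLast (by simp))
      simp [List.getLast_cons]

-- B in canonical form
theorem pv_alt_char (name : String) :
    nice_name_a_alt name
      = (decide (3 ≤ (name.toList.countP pvIsVowel : Int)) && pvHasDbl name.toList &&
         !pvHasBad name.toList) := by
  unfold nice_name_a_alt
  show (decide (3 ≤ (name.toList.foldl pvStepB (0, false, false, none)).1) &&
        (name.toList.foldl pvStepB (0, false, false, none)).2.1 &&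
        !(name.toList.foldl pvStepB (0, false, false, none)).2.2.1) = _
  cases h : name.toList with
  | nil => simp [pvHasDbl, pvHasBad]
  | cons c t =>
    have h1 : pvStepB (0, false, false, none) c
        = ((if c ∈ ['a','e','i','o','u'] then (0:Int) + 1 else 0), false, false, some c) := by
      simp [pvStepB]
    rw [List.foldl_cons, h1, pv_fold_inv t c _ false false]
    simp only [List.countP_cons, pvIsVowel, Bool.false_or]
    by_cases hc : (c ∈ ['a','e','i','o','u']) <;> simp [hc, Int.add_comm]

-- ===== VERDICT (by name: the statement is the Claim_ definition above) =====
theorem nice_name_a_spec : Claim_equal_nice_name_a := by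
  intro name _
  show nice_name_a name = nice_name_a_alt name
  rw [pv_alt_char]
  simp only [nice_name_a, pv_vowel_sum]
  by_cases h1 : (3 ≤ (name.toList.countP pvIsVowel : Int))
  · simp only [h1, decide_true, Bool.not_true, Bool.false_eq_true, if_false, Bool.true_and]
    -- double condition
    have hdbl : (PySem.List.pyRange 0 (PySem.List.len name.toList - 1) 1).any
        (fun p => PySem.List.pyGetD name.toList p ' ' == PySem.List.pyGetD name.toList (p + 1) ' ')
        = pvHasDbl name.toList := by
      cases hc : name.toList with
      | nil => simp [PySem.List.pyRange, PySem.List.len, pvHasDbl]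
      | cons a t =>
        have hl : PySem.List.len (a :: t) - 1 = ((a :: t).length - 1 : Nat) := by
          simp [PySem.List.len_eq]
        rw [hl, PySem.List.pyRange_zero_natCast, List.any_map]
        rw [← pv_range_dbl a t]
        refine PySem.List.any_congr_mem fun p hp => ?_
        have hp' : p < (a :: t).length - 1 := List.mem_range.mp hp
        have h1 : PySem.List.pyGetD (a :: t) (p : Int) ' ' = (a :: t).getD p ' ' :=
          PySem.List.pyGetD_natCast ..
        have h2 : PySem.List.pyGetD (a :: t) ((p : Int) + 1) ' ' = (a :: t).getD (p + 1) ' ' := by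
          have : ((p : Int) + 1) = ((p + 1 : Nat) : Int) := by push_cast; ring
          rw [this, PySem.List.pyGetD_natCast]
        rw [Function.comp_apply, h1, h2]
    rw [hdbl]
    by_cases h2 : pvHasDbl name.toList
    · simp only [h2, Bool.not_true, Bool.false_eq_true, if_false, Bool.true_and]
      -- bad condition
      rw [pv_hasBad_eq]
      congr 1
      simp only [List.any_cons, List.any_nil, Bool.or_false]
      have hpair : ∀ (s : String) (x y : Char), s.toList = [x, y] →
          PySem.Str.isIn s name = pvHasSub2 x y name.toList := by
        intro s x y hs
        rw [Bool.eq_iff_iff, PySem.Str.isIn_iff_infix, hs, pv_infix2]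
      rw [hpair "ab" 'a' 'b' (by decide), hpair "cd" 'c' 'd' (by decide),
          hpair "pq" 'p' 'q' (by decide), hpair "xy" 'x' 'y' (by decide)]
      simp [Bool.or_assoc]
    · simp [h2]
  · simp [h1]
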